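-- pv_equiv track=rewrite | github.com/jzeynalee/rest_bot | utils/timeframe.py | normalize_tf
-- ===== SOURCE A (Python) =====
-- def normalize_tf(tf: str) -> str:
--     """
--     Map a bunch of aliases to a canonical key ('1h', '4h', ...).
--     Extend if you add more.
--     """
--     t = tf.lower()
--     aliases = {
--         "1m": ["1m", "1min", "minute1"],
--         "5m": ["5m", "5min", "minute5"],
--         "15m": ["15m", "15min", "minute15"],
--         "30m": ["30m", "30min", "minute30"],
--         "1h": ["1h", "h1", "hour1"],
--         "4h": ["4h", "h4", "hour4"],
--         "8h": ["8h", "hour8"],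
--         "12h": ["12h", "hour12"],
--         "1d": ["1d", "day1"],
--         "1w": ["1w", "week1"],
--         "1mth": ["1mth", "month1"],
--     }
--     for canon, alts in aliases.items():
--         if t in alts:
--             return canon
--     return t
-- ===== SOURCE B (Python) =====
-- def normalize_tf(tf: str) -> str:
--     """Parse the alias structurally: peel the unit word off and reassemble the
--     canonical short form, instead of scanning an alias table."""
--     t = tf.lower()
--     if t.endswith("min") and t[:-3] in ("1", "5", "15", "30"):
--         return t[:-3] + "m"
--     if t.startswith("minute") and t[6:] in ("1", "5", "15", "30"):
--         return t[6:] + "m"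
--     if t.startswith("hour") and t[4:] in ("1", "4", "8", "12"):
--         return t[4:] + "h"
--     if t.startswith("h") and t[1:] in ("1", "4"):
--         return t[1:] + "h"
--     if t == "day1":
--         return "1d"
--     if t == "week1":
--         return "1w"
--     if t == "month1":
--         return "1mth"
--     return t
-- ===== Notes on version B (the rewrite author's own statement) =====
-- stated objective: alternative
-- what changed: Replaces A's alias-table scan (build a canon->aliases dict, loop over groups testing list membership) with a structural parser that peels the unit word off the lowercased input (endswith/startswith plus a slice), validates the numeric part, and reassembles the canonical short form; no alias table is consulted.
import Mathlib
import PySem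

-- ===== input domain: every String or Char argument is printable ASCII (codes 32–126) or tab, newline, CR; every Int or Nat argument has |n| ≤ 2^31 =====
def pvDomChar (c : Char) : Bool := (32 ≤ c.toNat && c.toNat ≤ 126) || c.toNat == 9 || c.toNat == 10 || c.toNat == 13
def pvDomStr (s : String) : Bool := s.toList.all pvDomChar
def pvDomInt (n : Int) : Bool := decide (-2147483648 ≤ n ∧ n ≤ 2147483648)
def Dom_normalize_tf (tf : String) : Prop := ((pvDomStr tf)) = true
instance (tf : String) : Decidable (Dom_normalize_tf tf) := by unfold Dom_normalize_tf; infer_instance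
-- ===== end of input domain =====

-- B parses the alias structurally (peel the unit word off, reassemble the canonical short form) instead of scanning an alias table (alternative decomposition).

-- ===== PORT A =====
-- the 'aliases' dict literal of A, as its (canon, alts) items in insertion order
def pvGroups : List (String × List String) :=
  [("1m", ["1m", "1min", "minute1"]),
   ("5m", ["5m", "5min", "minute5"]),
   ("15m", ["15m", "15min", "minute15"]),
   ("30m", ["30m", "30min", "minute30"]),
   ("1h", ["1h", "h1", "hour1"]),
   ("4h", ["4h", "h4", "hour4"]),
   ("8h", ["8h", "hour8"]),
   ("12h", ["12h", "hour12"]),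
   ("1d", ["1d", "day1"]),
   ("1w", ["1w", "week1"]),
   ("1mth", ["1mth", "month1"])]

-- the 'for canon, alts in aliases.items(): if t in alts: return canon' loop
def pvScanGroups (t : String) : List (String × List String) → String
  | [] => t
  | (canon, alts) :: rest => if alts.contains t then canon else pvScanGroups t rest

def normalize_tf (tf : String) : String :=
  let t := PySem.Str.lower tf
  pvScanGroups t pvGroups

-- ===== PORT B =====
-- Source B's chain of pattern tests on the lowercased input
def pvClassify (t : String) : String :=
  if PySem.Str.endswith t "min" && ["1", "5", "15", "30"].contains (PySem.Str.slice t none (some (-3))) then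
    PySem.Str.slice t none (some (-3)) ++ "m"
  else if PySem.Str.startswith t "minute" && ["1", "5", "15", "30"].contains (PySem.Str.slice t (some 6) none) then
    PySem.Str.slice t (some 6) none ++ "m"
  else if PySem.Str.startswith t "hour" && ["1", "4", "8", "12"].contains (PySem.Str.slice t (some 4) none) then
    PySem.Str.slice t (some 4) none ++ "h"
  else if PySem.Str.startswith t "h" && ["1", "4"].contains (PySem.Str.slice t (some 1) none) then
    PySem.Str.slice t (some 1) none ++ "h"
  else if t = "day1" then "1d"
  else if t = "week1" then "1w"
  else if t = "month1" then "1mth"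
  else t

def normalize_tf_alt (tf : String) : String :=
  pvClassify (PySem.Str.lower tf)

-- ===== PRECONDITION & SPEC =====
def Spec_normalize_tf (tf : String) (out : String) : Prop := out = normalize_tf_alt tf
instance (tf : String) (out : String) : Decidable (Spec_normalize_tf tf out) := by unfold Spec_normalize_tf; infer_instance

-- ===== CLAIM (what is proved, stated in full; the proofs are below) =====
def Claim_equal_normalize_tf : Prop := ∀ (tf : String), Dom_normalize_tf tf → Spec_normalize_tf tf (normalize_tf tf)

-- ===== LEMMAS AND PROOFS =====

-- the 27 alias strings A recognises
def pvAllAliases : List String :=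
  ["1m", "1min", "minute1", "5m", "5min", "minute5", "15m", "15min", "minute15",
   "30m", "30min", "minute30", "1h", "h1", "hour1", "4h", "h4", "hour4",
   "8h", "hour8", "12h", "hour12", "1d", "day1", "1w", "week1", "1mth", "month1"]

-- A's scan returns t unchanged when t is in none of the alias groups
theorem scan_of_not_mem (t : String) (gs : List (String × List String))
    (h : ∀ g ∈ gs, t ∉ g.2) : pvScanGroups t gs = t := by
  induction gs with
  | nil => rfl
  | cons g rest ih =>
    obtain ⟨canon, alts⟩ := g
    have hni : t ∉ alts := h (canon, alts) List.mem_cons_self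
    simp only [pvScanGroups, List.contains_eq_mem, hni, decide_false]
    exact ih fun g hg => h g (List.mem_cons_of_mem _ hg)

-- if branch 1's test fires, t is one of the four '<n>min' aliases
theorem cond1_mem (t : String) (h1 : PySem.Str.endswith t "min" = true)
    (h2 : PySem.Str.slice t none (some (-3)) ∈ (["1", "5", "15", "30"] : List String)) :
    t ∈ pvAllAliases := by
  rw [show PySem.Str.endswith t "min" = PySem.Chars.endswith t.toList ['m','i','n'] from by simp [pysem],
      PySem.Chars.endswith_iff] at h1
  obtain ⟨p, hp⟩ := h1
  have hslice : (PySem.Str.slice t none (some (-3))).toList = p := by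
    have h3 : (PySem.Str.slice t none (some (-3))).toList = t.toList.take (t.toList.length - 3) := by
      simp only [pysem]
      rw [PySem.List.slice_to_neg_ofNat t.toList 3 (by omega)]
    rw [h3, ← hp]
    simp
  have ht : t = String.ofList (p ++ ['m','i','n']) := by
    rw [hp, String.ofList_toList]
  simp only [List.mem_cons, List.not_mem_nil, or_false] at h2
  rcases h2 with h2 | h2 | h2 | h2 <;> (rw [h2] at hslice; rw [ht, ← hslice]; decide)

-- if a startswith-branch test fires, t = pre ++ rest with rest = the drop-slice
theorem startswith_split (t pre : String) (n : Nat) (hn : pre.toList.length = n)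
    (h : PySem.Str.startswith t pre = true) :
    t.toList = pre.toList ++ (PySem.Str.slice t (some (n : Int)) none).toList := by
  rw [show PySem.Str.startswith t pre = PySem.Chars.startswith t.toList pre.toList from by simp [pysem],
      PySem.Chars.startswith_iff] at h
  obtain ⟨q, hq⟩ := h
  have hslice : (PySem.Str.slice t (some (n : Int)) none).toList = t.toList.drop n := by
    simp [pysem]
  rw [hslice, ← hq, ← hn, List.drop_left]

-- a startswith test plus membership of the dropped tail pins t to a literal alias
theorem condS_mem (t pre : String) (n : Nat) (hn : pre.toList.length = n)
    (opts : List String)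
    (h1 : PySem.Str.startswith t pre = true)
    (h2 : PySem.Str.slice t (some (n : Int)) none ∈ opts)
    (hall : ∀ o ∈ opts, String.ofList (pre.toList ++ o.toList) ∈ pvAllAliases) :
    t ∈ pvAllAliases := by
  have ht := startswith_split t pre n hn h1
  have he : t = String.ofList (pre.toList ++ (PySem.Str.slice t (some (n : Int)) none).toList) := by
    rw [← ht, String.ofList_toList]
  rw [he]
  exact hall _ h2

-- the heart of the claim: A's group scan and B's structural parse agree after lowering
theorem scan_eq_classify (t : String) : pvScanGroups t pvGroups = pvClassify t := by
  by_cases h : t ∈ pvAllAliases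
  · fin_cases h <;> decide
  · have c1 : ¬(PySem.Str.endswith t "min" && ["1", "5", "15", "30"].contains (PySem.Str.slice t none (some (-3)))) = true := by
      intro hc
      rw [Bool.and_eq_true] at hc
      exact h (cond1_mem t hc.1 (by have hm := hc.2; rwa [List.contains_eq_mem, decide_eq_true_eq] at hm))
    have c2 : ¬(PySem.Str.startswith t "minute" && ["1", "5", "15", "30"].contains (PySem.Str.slice t (some 6) none)) = true := by
      intro hc
      rw [Bool.and_eq_true] at hc
      exact h (condS_mem t "minute" 6 (by decide) _ hc.1 (by have hm := hc.2; rwa [List.contains_eq_mem, decide_eq_true_eq] at hm) (by decide))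
    have c3 : ¬(PySem.Str.startswith t "hour" && ["1", "4", "8", "12"].contains (PySem.Str.slice t (some 4) none)) = true := by
      intro hc
      rw [Bool.and_eq_true] at hc
      exact h (condS_mem t "hour" 4 (by decide) _ hc.1 (by have hm := hc.2; rwa [List.contains_eq_mem, decide_eq_true_eq] at hm) (by decide))
    have c4 : ¬(PySem.Str.startswith t "h" && ["1", "4"].contains (PySem.Str.slice t (some 1) none)) = true := by
      intro hc
      rw [Bool.and_eq_true] at hc
      exact h (condS_mem t "h" 1 (by decide) _ hc.1 (by have hm := hc.2; rwa [List.contains_eq_mem, decide_eq_true_eq] at hm) (by decide))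
    have c5 : t ≠ "day1" := by intro hc; exact h (hc ▸ (by decide))
    have c6 : t ≠ "week1" := by intro hc; exact h (hc ▸ (by decide))
    have c7 : t ≠ "month1" := by intro hc; exact h (hc ▸ (by decide))
    have hs : pvScanGroups t pvGroups = t := by
      apply scan_of_not_mem
      intro g hg hm
      apply h
      fin_cases hg <;> simp only [List.mem_cons, List.not_mem_nil, or_false] at hm <;>
        (rcases hm with rfl | rfl | rfl) <;> decide
    rw [hs]
    rw [Bool.not_eq_true] at c1 c2 c3 c4
    simp only [pvClassify, c1, c2, c3, c4, Bool.false_eq_true, if_false, if_neg c5, if_neg c6, if_neg c7]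

-- ===== VERDICT (by name: the statement is the Claim_ definition above) =====
theorem normalize_tf_spec : Claim_equal_normalize_tf := by
  intro tf _
  unfold Spec_normalize_tf normalize_tf normalize_tf_alt
  exact scan_eq_classify (PySem.Str.lower tf)
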